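-- pv_equiv track=rewrite | github.com/ioerger/transit2 | src/pytransit/analysis/relative_essentiality.py | remove_essential_regions
-- ===== SOURCE A (Python) =====
-- def remove_essential_regions(wig,W):
--   runs = []
--   i,n = 0,len(wig)
--   while i<n:
--     if wig[i]>0: i += 1
--     else:
--       j = i
--       while j<n and wig[j]==0: j += 1
--       runs.append((i,j))
--       i = j
--   counts = []
--   for k,(i,j) in enumerate(runs):
--     if j-i<W: counts += wig[i:j]
--     if k<len(runs)-1:
--       next = runs[k+1][0]
--       counts += wig[j:next]
--   return counts
-- ===== SOURCE B (Python) =====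
-- def remove_essential_regions(wig, W):
--     # Group wig into maximal runs of equal sign (groupby-style), trim the
--     # leading/trailing positive groups, then keep positive groups in full and
--     # zero groups only when shorter than W.
--     groups = []
--     for x in wig:
--         if groups and groups[-1][0] == (x > 0):
--             groups[-1][1].append(x)
--         else:
--             groups.append((x > 0, [x]))
--     if all(pos for pos, _ in groups):
--         return []
--     if groups[0][0]:
--         groups.pop(0)
--     if groups[-1][0]:
--         groups.pop()
--     out = []
--     for pos, vals in groups:
--         if pos or len(vals) < W:
--             out.extend(vals)
--     return out
-- ===== Notes on version B (the rewrite author's own statement) =====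
-- stated objective: alternative
-- what changed: B replaces A's index-based while-loops (collecting (i,j) run boundaries and re-slicing the wig) with a single groupby-style pass that materializes maximal sign-runs as lists, trims the leading/trailing positive group, and filters zero-groups by length.
import Mathlib
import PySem

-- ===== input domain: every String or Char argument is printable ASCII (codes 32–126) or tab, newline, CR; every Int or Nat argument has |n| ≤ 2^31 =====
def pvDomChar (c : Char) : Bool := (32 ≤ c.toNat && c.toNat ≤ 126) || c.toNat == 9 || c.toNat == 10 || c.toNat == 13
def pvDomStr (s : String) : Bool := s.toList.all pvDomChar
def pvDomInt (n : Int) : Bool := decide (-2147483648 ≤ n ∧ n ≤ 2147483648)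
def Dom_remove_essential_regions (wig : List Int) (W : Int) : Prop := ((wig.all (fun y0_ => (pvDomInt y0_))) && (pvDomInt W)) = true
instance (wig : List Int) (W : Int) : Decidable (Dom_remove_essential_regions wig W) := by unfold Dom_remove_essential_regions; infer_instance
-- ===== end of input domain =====

-- B replaces A's index-based while-loops with a single groupby-style pass over sign-runs
-- (alternative decomposition, same O(n) cost).

-- ===== PORT A =====
-- inner 'while j<n and wig[j]==0: j += 1' (indices the loop reaches are 0 ≤ j; getD is exact there)
def reInner (wig : List Int) (n : Nat) (j : Nat) : Nat :=
  if h : j < n ∧ wig.getD j 0 = 0 then reInner wig n (j + 1) else j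
termination_by n - j
decreasing_by omega

-- outer 'while i<n' loop; fuel n+1 suffices whenever the Python loop terminates
-- (on a negative entry the Python loop never advances — excluded by Pre_ below)
def reOuter (wig : List Int) (n : Nat) : Nat → Nat → List (Nat × Nat) → List (Nat × Nat)
  | 0, _, runs => runs
  | fuel + 1, i, runs =>
    if i < n then
      if 0 < wig.getD i 0 then reOuter wig n fuel (i + 1) runs
      else
        let j := reInner wig n i
        reOuter wig n fuel j (runs ++ [(i, j)])
    else runs

-- 'for k,(i,j) in enumerate(runs)' ported with zipIdx (same pairs, Nat index);
-- the slices wig[i:j] and wig[j:next] have 0 ≤ i ≤ j, so drop/take is exact.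
def remove_essential_regions (wig : List Int) (W : Int) : List Int :=
  let n := wig.length
  let runs := reOuter wig n (n + 1) 0 []
  runs.zipIdx.foldl (fun counts q =>
    let i : Nat := q.1.1
    let j : Nat := q.1.2
    let k : Nat := q.2
    let counts := if ((j : Int) - (i : Int)) < W then counts ++ ((wig.drop i).take (j - i)) else counts
    if k < runs.length - 1 then
      counts ++ ((wig.drop j).take ((runs.getD (k + 1) (0, 0)).1 - j))
    else counts) []

-- ===== PORT B =====
-- one step of the grouping pass: extend the last group if the sign matches, else open a new one
def addGroup (gs : List (Bool × List Int)) (x : Int) : List (Bool × List Int) :=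
  match gs.getLast? with
  | some (b, vs) =>
    if b = decide (0 < x) then gs.dropLast ++ [(b, vs ++ [x])]
    else gs ++ [(decide (0 < x), [x])]
  | none => [(decide (0 < x), [x])]

def remove_essential_regions_alt (wig : List Int) (W : Int) : List Int :=
  let groups := wig.foldl addGroup []
  if groups.all (fun g => g.1) then []
  else
    let groups1 := if (groups.headD (true, [])).1 then groups.tail else groups
    let groups2 := if (groups1.getLastD (true, [])).1 then groups1.dropLast else groups1
    groups2.foldl (fun out g => if g.1 || decide ((g.2.length : Int) < W) then out ++ g.2 else out) []

-- ===== PRECONDITION & SPEC =====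
-- Pre_ excludes wigs containing a negative entry: there A's inner loop stops at once and the
-- outer loop never advances, so the Python A loops forever (it never returns).
def Pre_remove_essential_regions (wig : List Int) (W : Int) : Prop := ∀ x ∈ wig, 0 ≤ x
instance (wig : List Int) (W : Int) : Decidable (Pre_remove_essential_regions wig W) := by unfold Pre_remove_essential_regions; infer_instance

def pvWitness_remove_essential_regions : List Int × Int := ([0, 1, 0, 0, 2, 3, 0], 2)

def Spec_remove_essential_regions (wig : List Int) (W : Int) (out : List Int) : Prop := out = remove_essential_regions_alt wig W
instance (wig : List Int) (W : Int) (out : List Int) : Decidable (Spec_remove_essential_regions wig W out) := by unfold Spec_remove_essential_regions; infer_instance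

-- ===== CLAIM (what is proved, stated in full; the proofs are below) =====
def Claim_equal_remove_essential_regions : Prop := ∀ (wig : List Int) (W : Int), Dom_remove_essential_regions wig W → Pre_remove_essential_regions wig W → Spec_remove_essential_regions wig W (remove_essential_regions wig W)

-- ===== LEMMAS AND PROOFS =====

-- listy mirror of A's run collection (same fuel discipline as reOuter)
def runsL : Nat → List Int → Nat → List (Nat × Nat)
  | 0, _, _ => []
  | _ + 1, [], _ => []
  | fuel + 1, x :: t, i =>
    if 0 < x then runsL fuel t (i + 1)
    else
      let z := (x :: t).takeWhile (fun y => decide (y = 0))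
      (i, i + z.length) :: runsL fuel ((x :: t).drop z.length) (i + z.length)

-- recursive form of A's counts fold
def cf (wig : List Int) (W : Int) : List (Nat × Nat) → List Int
  | [] => []
  | [(i, j)] => if ((j : Int) - (i : Int)) < W then (wig.drop i).take (j - i) else []
  | (i, j) :: (i', j') :: rest =>
      (if ((j : Int) - (i : Int)) < W then (wig.drop i).take (j - i) else []) ++
        (wig.drop j).take (i' - j) ++ cf wig W ((i', j') :: rest)

-- canonical sign-grouping (what B's fold computes)
def G : List Int → List (Bool × List Int)
  | [] => []
  | x :: t =>
    (decide (0 < x), x :: t.takeWhile (fun y => decide (0 < y) == decide (0 < x))) ::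
      G (t.dropWhile (fun y => decide (0 < y) == decide (0 < x)))
termination_by w => w.length
decreasing_by
  simp only [List.length_cons]
  exact Nat.lt_succ_of_le (List.length_dropWhile_le _ _)

theorem reInner_char : ∀ (k : Nat) (wig : List Int) (j : Nat), wig.length - j ≤ k → j ≤ wig.length →
    reInner wig wig.length j = j + ((wig.drop j).takeWhile (fun y => decide (y = 0))).length := by
  intro k
  induction k with
  | zero =>
    intro wig j hk hj
    have hj' : j = wig.length := by omega
    rw [reInner]
    simp [hj', List.drop_length]
  | succ k ih =>
    intro wig j hk hj
    rw [reInner]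
    by_cases hlt : j < wig.length
    · have hdrop : wig.drop j = wig[j] :: wig.drop (j + 1) := List.drop_eq_getElem_cons hlt
      by_cases hz : wig.getD j 0 = 0
      · rw [dif_pos ⟨hlt, hz⟩]
        have hzv : wig[j] = 0 := by rw [List.getD_eq_getElem wig 0 hlt] at hz; exact hz
        rw [ih wig (j + 1) (by omega) (by omega), hdrop]
        simp [hzv]
        omega
      · rw [dif_neg (by tauto)]
        have hzv : ¬ wig[j] = 0 := by rw [List.getD_eq_getElem wig 0 hlt] at hz; exact hz
        rw [hdrop]
        simp [hzv]
    · rw [dif_neg (by tauto)]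
      have : j = wig.length := by omega
      simp [this, List.drop_length]

theorem runsL_char : ∀ (fuel : Nat) (wig : List Int) (i : Nat) (acc : List (Nat × Nat)), i ≤ wig.length →
    reOuter wig wig.length fuel i acc = acc ++ runsL fuel (wig.drop i) i := by
  intro fuel
  induction fuel with
  | zero => intro wig i acc hi; simp [reOuter, runsL]
  | succ fuel ih =>
    intro wig i acc hi
    by_cases hlt : i < wig.length
    · have hdrop : wig.drop i = wig[i] :: wig.drop (i + 1) := List.drop_eq_getElem_cons hlt
      have hget : wig.getD i 0 = wig[i] := List.getD_eq_getElem wig 0 hlt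
      rw [reOuter]
      by_cases hp : 0 < wig[i]
      · rw [if_pos hlt, if_pos (by rw [hget]; exact hp), ih wig (i + 1) acc (by omega)]
        rw [hdrop, runsL, if_pos hp]
      · rw [if_pos hlt, if_neg (by rw [hget]; exact hp)]
        have hin : reInner wig wig.length i = i + ((wig.drop i).takeWhile (fun y => decide (y = 0))).length :=
          reInner_char (wig.length - i) wig i (by omega) (by omega)
        set zl := ((wig.drop i).takeWhile (fun y => decide (y = 0))).length with hzl
        have hzle : zl ≤ wig.length - i := by
          have h1 : zl ≤ (wig.drop i).length :=
            (List.takeWhile_sublist (fun y => decide (y = 0))).length_le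
          simpa [List.length_drop] using h1
        simp only [hin]
        rw [ih wig (i + zl) (acc ++ [(i, i + zl)]) (by omega)]
        have hz' : ((wig[i] :: wig.drop (i + 1)).takeWhile (fun y => decide (y = 0))).length = zl := by
          rw [← hdrop]
        conv_rhs => rw [hdrop, runsL, if_neg hp]
        simp only [hz', ← hdrop, List.drop_drop]
        rw [← hzl]
        simp
    · have hi' : i = wig.length := by omega
      rw [reOuter, if_neg hlt, hi', List.drop_length, runsL]
      simp

theorem runsL_fuel : ∀ (f1 f2 : Nat) (w : List Int) (i : Nat), (∀ x ∈ w, 0 ≤ x) →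
    w.length < f1 → w.length < f2 → runsL f1 w i = runsL f2 w i := by
  intro f1
  induction f1 with
  | zero => intro f2 w i _ h1 _; omega
  | succ f1 ih =>
    intro f2 w i hnn h1 h2
    match f2, w with
    | f2 + 1, [] => rw [runsL, runsL]
    | f2 + 1, x :: t =>
      by_cases hp : 0 < x
      · rw [runsL, if_pos hp, runsL, if_pos hp]
        exact ih f2 t (i + 1) (fun y hy => hnn y (List.mem_cons_of_mem x hy)) (by simp at h1 ⊢; omega) (by simp at h2 ⊢; omega)
      · have hx0 : x = 0 := le_antisymm (not_lt.mp hp) (hnn x (List.mem_cons_self))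
        rw [runsL, if_neg hp, runsL, if_neg hp]
        have hzlen : 1 ≤ ((x :: t).takeWhile (fun y => decide (y = 0))).length := by
          rw [List.takeWhile_cons, if_pos (by simp [hx0])]
          simp
        set z := (x :: t).takeWhile (fun y => decide (y = 0)) with hz
        have hzle : z.length ≤ (x :: t).length :=
          (List.takeWhile_sublist _).length_le
        exact congrArg (fun r => (i, i + z.length) :: r) (ih f2 ((x :: t).drop z.length) (i + z.length)
          (fun y hy => hnn y (List.mem_of_mem_drop hy))
          (by simp [List.length_drop] at h1 ⊢; omega)
          (by simp [List.length_drop] at h2 ⊢; omega))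

theorem runsL_shift : ∀ (fuel : Nat) (w : List Int) (i m : Nat),
    runsL fuel w (m + i) = (runsL fuel w i).map (fun r => (m + r.1, m + r.2)) := by
  intro fuel
  induction fuel with
  | zero => intro w i m; simp [runsL]
  | succ fuel ih =>
    intro w i m
    match w with
    | [] => simp [runsL]
    | x :: t =>
      by_cases hp : 0 < x
      · rw [runsL, if_pos hp, runsL, if_pos hp, ← ih]
        congr 1
      · rw [runsL, if_neg hp, runsL, if_neg hp]
        simp only [List.map_cons]
        rw [Nat.add_assoc m i _, ih]

theorem runsL_skip : ∀ (p : List Int) (w : List Int) (i fuel : Nat), (∀ x ∈ p, 0 < x) →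
    runsL (p.length + fuel) (p ++ w) i = runsL fuel w (i + p.length) := by
  intro p
  induction p with
  | nil => intro w i fuel _; simp
  | cons x p' ih =>
    intro w i fuel hpos
    have hx : 0 < x := hpos x List.mem_cons_self
    have : (x :: p').length + fuel = ((p').length + fuel) + 1 := by simp; omega
    rw [this, List.cons_append, runsL, if_pos hx,
      ih w (i + 1) fuel (fun y hy => hpos y (List.mem_cons_of_mem x hy))]
    congr 1
    omega

theorem cf_eq (wig : List Int) (W : Int) : ∀ (s full : List (Nat × Nat)) (k0 : Nat) (acc : List Int),
    full.drop k0 = s →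
    (s.zipIdx k0).foldl (fun counts q =>
      let i : Nat := q.1.1
      let j : Nat := q.1.2
      let k : Nat := q.2
      let counts := if ((j : Int) - (i : Int)) < W then counts ++ ((wig.drop i).take (j - i)) else counts
      if k < full.length - 1 then
        counts ++ ((wig.drop j).take ((full.getD (k + 1) (0, 0)).1 - j))
      else counts) acc = acc ++ cf wig W s := by
  intro s
  induction s with
  | nil => intro full k0 acc h; simp [cf]
  | cons hd s' ih =>
    intro full k0 acc hdrop
    obtain ⟨i, j⟩ := hd
    have hl := congrArg List.length hdrop
    simp only [List.length_drop, List.length_cons] at hl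
    have hk0 : k0 < full.length := by omega
    have hlen : full.length = k0 + 1 + s'.length := by omega
    have hdrop' : full.drop (k0 + 1) = s' := by
      have h2 : full.drop (k0 + 1) = (full.drop k0).drop 1 := by
        rw [List.drop_drop]
      rw [h2, hdrop]
      simp
    match s' with
    | [] =>
      simp only [List.length_nil] at hlen
      have hnolast : ¬ (k0 < full.length - 1) := by omega
      rw [List.zipIdx_cons, List.zipIdx_nil, List.foldl_cons, List.foldl_nil, cf]
      simp only
      rw [if_neg hnolast]
      split_ifs <;> simp
    | (i', j') :: rest =>
      have hget : full.getD (k0 + 1) (0, 0) = (i', j') := by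
        rw [List.getD_eq_getElem?_getD, ← List.getElem?_drop (xs := full) (i := k0 + 1) (j := 0)]
        rw [hdrop']
        simp
      have hlast : k0 < full.length - 1 := by simp at hlen; omega
      rw [List.zipIdx_cons, List.foldl_cons, ih full (k0 + 1) _ hdrop', cf]
      simp only [hget, if_pos hlast]
      split_ifs <;> simp [List.append_assoc]

theorem drop_add_append (pre t : List Int) (i : Nat) :
    (pre ++ t).drop (pre.length + i) = t.drop i := by
  rw [← List.drop_drop, List.drop_left]

theorem cf_shift (W : Int) : ∀ (rs : List (Nat × Nat)) (pre t : List Int),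
    cf (pre ++ t) W (rs.map (fun r => (pre.length + r.1, pre.length + r.2))) = cf t W rs := by
  intro rs
  induction rs with
  | nil => intro pre t; simp [cf]
  | cons hd rs' ih =>
    intro pre t
    obtain ⟨i, j⟩ := hd
    have hcast : ((pre.length + j : Nat) : Int) - ((pre.length + i : Nat) : Int) = (j : Int) - (i : Int) := by
      push_cast; ring
    match rs' with
    | [] =>
      simp only [List.map_cons, List.map_nil, cf]
      rw [hcast, drop_add_append]
      have : pre.length + j - (pre.length + i) = j - i := by omega
      rw [this]
    | (i', j') :: rest =>
      simp only [List.map_cons] at ih ⊢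
      rw [cf, cf]
      rw [hcast, drop_add_append, drop_add_append]
      have h1 : pre.length + j - (pre.length + i) = j - i := by omega
      have h2 : pre.length + i' - (pre.length + j) = i' - j := by omega
      rw [h1, h2, ih pre t]

theorem A_eq_cf (wig : List Int) (W : Int) :
    remove_essential_regions wig W = cf wig W (runsL (wig.length + 1) wig 0) := by
  simp only [remove_essential_regions]
  rw [runsL_char (wig.length + 1) wig 0 [] (by omega)]
  simp only [List.nil_append, List.drop_zero]
  exact cf_eq wig W _ _ 0 [] rfl

theorem foldG : ∀ (w : List Int) (gs0 : List (Bool × List Int)) (b : Bool) (vs : List Int),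
    List.foldl addGroup (gs0 ++ [(b, vs)]) w =
      gs0 ++ [(b, vs ++ w.takeWhile (fun y => decide (0 < y) == b))] ++
        G (w.dropWhile (fun y => decide (0 < y) == b)) := by
  intro w
  induction w with
  | nil => intro gs0 b vs; simp [G]
  | cons x t ih =>
    intro gs0 b vs
    rw [List.foldl_cons]
    have hstep : addGroup (gs0 ++ [(b, vs)]) x =
        if b = decide (0 < x) then gs0 ++ [(b, vs ++ [x])]
        else (gs0 ++ [(b, vs)]) ++ [(decide (0 < x), [x])] := by
      unfold addGroup
      rw [List.getLast?_concat]
      show (if b = decide (0 < x) then (gs0 ++ [(b, vs)]).dropLast ++ [(b, vs ++ [x])]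
            else (gs0 ++ [(b, vs)]) ++ [(decide (0 < x), [x])]) = _
      rw [List.dropLast_concat]
    by_cases hb : b = decide (0 < x)
    · rw [hstep, if_pos hb, ih]
      have hpx : (decide (0 < x) == b) = true := by simp [hb]
      rw [List.takeWhile_cons, List.dropWhile_cons, if_pos hpx, if_pos hpx]
      simp
    · rw [hstep, if_neg hb, ih]
      have hpx : (decide (0 < x) == b) = false := by simp; exact fun h => absurd h.symm hb
      rw [List.takeWhile_cons, List.dropWhile_cons, if_neg (by simp [hpx]), if_neg (by simp [hpx])]
      conv_rhs => rw [G]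
      simp

theorem groups_eq (w : List Int) : w.foldl addGroup [] = G w := by
  match w with
  | [] => simp [G]
  | x :: t =>
    rw [List.foldl_cons]
    have h0 : addGroup [] x = [] ++ [(decide (0 < x), [x])] := by simp [addGroup]
    rw [h0, foldG]
    conv_rhs => rw [G]
    simp

theorem A_pos (W : Int) (x : Int) (t : List Int) (hx : 0 < x) :
    remove_essential_regions (x :: t) W = remove_essential_regions t W := by
  rw [A_eq_cf, A_eq_cf]
  have h1 : runsL ((x :: t).length + 1) (x :: t) 0 = runsL (t.length + 1) t 1 := by
    simp only [List.length_cons]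
    rw [runsL, if_pos hx]
  have h2 : runsL (t.length + 1) t 1 =
      (runsL (t.length + 1) t 0).map (fun r => ((1 : Nat) + r.1, (1 : Nat) + r.2)) := by
    have := runsL_shift (t.length + 1) t 0 1
    simpa using this
  rw [h1, h2]
  have h3 : x :: t = [x] ++ t := rfl
  rw [h3]
  exact cf_shift W (runsL (t.length + 1) t 0) [x] t

theorem A_posdrop (W : Int) : ∀ (w : List Int),
    remove_essential_regions w W = remove_essential_regions (w.dropWhile (fun y => decide (0 < y))) W := by
  intro w
  induction w with
  | nil => simp
  | cons x t ih =>
    by_cases hx : 0 < x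
    · rw [List.dropWhile_cons, if_pos (by simp [hx]), A_pos W x t hx, ih]
    · rw [List.dropWhile_cons, if_neg (by simp [hx])]

theorem A_zero (W : Int) (t : List Int) (z r p r' : List Int)
    (hz : z = ((0 : Int) :: t).takeWhile (fun y => decide (y = 0)))
    (hr : r = ((0 : Int) :: t).dropWhile (fun y => decide (y = 0)))
    (hp : p = r.takeWhile (fun y => decide (0 < y)))
    (hr' : r' = r.dropWhile (fun y => decide (0 < y)))
    (hnn : ∀ x ∈ (0 : Int) :: t, 0 ≤ x) :
    remove_essential_regions ((0 : Int) :: t) W =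
      (if (z.length : Int) < W then z else []) ++
        (if r' = [] then [] else p ++ remove_essential_regions r' W) := by
  have hzr : z ++ r = (0 : Int) :: t := by rw [hz, hr]; exact List.takeWhile_append_dropWhile
  have hz1 : 1 ≤ z.length := by rw [hz, List.takeWhile_cons]; simp
  have hpr' : p ++ r' = r := by rw [hp, hr']; exact List.takeWhile_append_dropWhile
  have hppos : ∀ x ∈ p, 0 < x := by
    intro x hx
    rw [hp] at hx
    have := List.mem_takeWhile_imp (p := fun y : Int => decide (0 < y)) hx
    simpa using this
  have hnr' : ∀ x ∈ r', 0 ≤ x := by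
    intro x hx
    apply hnn
    rw [← hzr, ← hpr']
    rw [hr'] at hx
    exact List.mem_append_right z (List.mem_append_right p (by rw [hr']; exact hx))
  have hlen : t.length + 1 = z.length + p.length + r'.length := by
    have := congrArg List.length hzr
    have h2 := congrArg List.length hpr'
    simp at this h2
    omega
  rw [A_eq_cf]
  have h1 : runsL (((0 : Int) :: t).length + 1) ((0 : Int) :: t) 0 =
      (0, z.length) :: runsL (t.length + 1) r z.length := by
    simp only [List.length_cons]
    rw [runsL, if_neg (by omega)]
    simp only [← hz, Nat.zero_add]
    congr 1
    rw [← hzr, List.drop_left]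
  have hdropr : ((0 : Int) :: t).drop z.length = r := by rw [← hzr, List.drop_left]
  rw [h1]
  have hf : t.length + 1 = p.length + (z.length + r'.length) := by omega
  have h2 : runsL (t.length + 1) r z.length =
      runsL (z.length + r'.length) r' (z.length + p.length) := by
    rw [hf, ← hpr', runsL_skip p r' z.length (z.length + r'.length) hppos]
  have h3 : runsL (z.length + r'.length) r' (z.length + p.length) =
      (runsL (r'.length + 1) r' 0).map
        (fun q => (z.length + p.length + q.1, z.length + p.length + q.2)) := by
    rw [runsL_fuel (z.length + r'.length) (r'.length + 1) r' (z.length + p.length) hnr' (by omega) (by omega)]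
    have := runsL_shift (r'.length + 1) r' 0 (z.length + p.length)
    simpa using this
  rw [h2, h3]
  by_cases hre : r' = []
  · subst hre
    have hR : runsL (List.length ([] : List Int) + 1) ([] : List Int) 0 = [] := rfl
    rw [hR]
    simp only [List.map_nil, List.append_nil] at hpr' ⊢
    rw [cf]
    simp only [Nat.cast_zero, Int.sub_zero, Nat.sub_zero, List.drop_zero, if_pos rfl]
    have htake : ((0 : Int) :: t).take z.length = z := by rw [← hzr, List.take_left]
    rw [htake]
    simp
  · obtain ⟨h', t', hcons⟩ := List.exists_cons_of_ne_nil hre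
    have hh0 : h' = 0 := by
      have hne : r.dropWhile (fun y => decide (0 < y)) ≠ [] := by rw [← hr']; exact hre
      have hhead := List.head_dropWhile_not (fun y : Int => decide (0 < y)) hne
      have hmem : r.dropWhile (fun y => decide (0 < y)) = h' :: t' := by rw [← hr', hcons]
      simp only [hmem, List.head_cons] at hhead
      simp at hhead
      have := hnr' h' (by rw [hcons]; exact List.mem_cons_self)
      omega
    have hR : ∃ j2 R2, runsL (r'.length + 1) r' 0 = (0, j2) :: R2 := by
      rw [hcons, hh0]
      simp only [List.length_cons]
      rw [runsL, if_neg (by omega)]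
      exact ⟨_, _, rfl⟩
    obtain ⟨j2, R2, hRe⟩ := hR
    rw [hRe]
    simp only [List.map_cons, Nat.add_zero]
    rw [cf]
    have htake : ((0 : Int) :: t).take z.length = z := by rw [← hzr, List.take_left]
    have hgap : (((0 : Int) :: t).drop z.length).take (z.length + p.length - z.length) = p := by
      rw [hdropr, ← hpr']
      have h5 : z.length + p.length - z.length = p.length := by omega
      rw [h5, List.take_left]
    have htail : cf ((0 : Int) :: t) W ((z.length + p.length, z.length + p.length + j2) :: R2.map
        (fun q => (z.length + p.length + q.1, z.length + p.length + q.2))) =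
        remove_essential_regions r' W := by
      have hpre : z.length + p.length = (z ++ p).length := by simp
      have hw : (0 : Int) :: t = (z ++ p) ++ r' := by rw [List.append_assoc, hpr', hzr]
      rw [A_eq_cf]
      calc cf ((0 : Int) :: t) W ((z.length + p.length, z.length + p.length + j2) :: R2.map
            (fun q => (z.length + p.length + q.1, z.length + p.length + q.2)))
          = cf ((z ++ p) ++ r') W (((0, j2) :: R2).map
            (fun q => ((z ++ p).length + q.1, (z ++ p).length + q.2))) := by
            rw [← hw, ← hpre]
            simp
        _ = cf r' W ((0, j2) :: R2) := cf_shift W ((0, j2) :: R2) (z ++ p) r'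
        _ = cf r' W (runsL (r'.length + 1) r' 0) := by rw [hRe]
    simp only [Nat.sub_zero, List.drop_zero, Nat.cast_zero, Int.sub_zero]
    rw [htake, hgap, htail, if_neg hre]
    split_ifs <;> simp [List.append_assoc]

theorem B_eq (wig : List Int) (W : Int) :
    remove_essential_regions_alt wig W =
      (if (G wig).all (fun g => g.1) then []
       else
         (if ((if ((G wig).headD (true, [])).1 then (G wig).tail else (G wig)).getLastD (true, [])).1
          then (if ((G wig).headD (true, [])).1 then (G wig).tail else (G wig)).dropLast
          else (if ((G wig).headD (true, [])).1 then (G wig).tail else (G wig))).foldl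
           (fun out g => if g.1 || decide ((g.2.length : Int) < W) then out ++ g.2 else out) []) := by
  simp only [remove_essential_regions_alt, groups_eq]

theorem foldOut (W : Int) : ∀ (gs : List (Bool × List Int)) (acc : List Int),
    gs.foldl (fun out g => if g.1 || decide ((g.2.length : Int) < W) then out ++ g.2 else out) acc =
      acc ++ gs.flatMap (fun g => if g.1 || decide ((g.2.length : Int) < W) then g.2 else []) := by
  intro gs
  induction gs with
  | nil => simp
  | cons g gs ih =>
    intro acc
    rw [List.foldl_cons, ih]
    by_cases h : (g.1 || decide ((g.2.length : Int) < W)) = true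
    · rw [if_pos h, List.flatMap_cons, if_pos h, List.append_assoc]
    · rw [if_neg h, List.flatMap_cons, if_neg h, List.nil_append]

theorem B_pos (W : Int) (x : Int) (t : List Int) (hx : 0 < x) :
    remove_essential_regions_alt (x :: t) W = remove_essential_regions_alt t W := by
  have hdx : decide (0 < x) = true := by simp [hx]
  have hfun : (fun y : Int => decide (0 < y) == decide (0 < x)) = fun y => decide (0 < y) := by
    funext y
    rw [hdx]
    cases decide (0 < y) <;> rfl
  have hG : G (x :: t) = (true, x :: t.takeWhile (fun y => decide (0 < y))) ::
      G (t.dropWhile (fun y => decide (0 < y))) := by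
    rw [G, hfun, hdx]
  rw [B_eq, B_eq, hG]
  cases t with
  | nil => simp [G]
  | cons y t2 =>
    by_cases hy : 0 < y
    · have hdy : decide (0 < y) = true := by simp [hy]
      have hfuny : (fun w : Int => decide (0 < w) == decide (0 < y)) = fun w => decide (0 < w) := by
        funext w
        rw [hdy]
        cases decide (0 < w) <;> rfl
      have hGy : G (y :: t2) = (true, y :: t2.takeWhile (fun w => decide (0 < w))) ::
          G (t2.dropWhile (fun w => decide (0 < w))) := by
        rw [G, hfuny, hdy]
      rw [List.dropWhile_cons, if_pos hdy, hGy]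
      simp
    · have hdy : decide (0 < y) = false := by simp [hy]
      have hGy : G (y :: t2) = (false, y :: t2.takeWhile (fun w => decide (0 < w) == false)) ::
          G (t2.dropWhile (fun w => decide (0 < w) == false)) := by
        rw [G, hdy]
      have hdw : List.dropWhile (fun w : Int => decide (0 < w)) (y :: t2) = y :: t2 := by
        rw [List.dropWhile_cons, if_neg (by simp [hy])]
      rw [hdw, hGy]
      simp

theorem B_posdrop (W : Int) : ∀ (w : List Int),
    remove_essential_regions_alt w W = remove_essential_regions_alt (w.dropWhile (fun y => decide (0 < y))) W := by
  intro w
  induction w with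
  | nil => simp
  | cons x t ih =>
    by_cases hx : 0 < x
    · rw [List.dropWhile_cons, if_pos (by simp [hx]), B_pos W x t hx, ih]
    · rw [List.dropWhile_cons, if_neg (by simp [hx])]

theorem tw_neg : ∀ (t : List Int), (∀ x ∈ t, 0 ≤ x) →
    t.takeWhile (fun y => !decide (0 < y)) = t.takeWhile (fun y => decide (y = 0)) ∧
      t.dropWhile (fun y => !decide (0 < y)) = t.dropWhile (fun y => decide (y = 0)) := by
  intro t
  induction t with
  | nil => intro _; simp
  | cons x s ih =>
    intro h
    have hx : 0 ≤ x := h x List.mem_cons_self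
    obtain ⟨ih1, ih2⟩ := ih (fun y hy => h y (List.mem_cons_of_mem x hy))
    by_cases h0 : x = 0
    · subst h0
      rw [List.takeWhile_cons, List.takeWhile_cons, List.dropWhile_cons, List.dropWhile_cons]
      simp [ih1, ih2]
    · have hpos : 0 < x := by omega
      rw [List.takeWhile_cons, List.takeWhile_cons, List.dropWhile_cons, List.dropWhile_cons]
      simp [hpos, h0]

theorem G_nil : G ([] : List Int) = [] := by rw [G]

theorem G_allpos : ∀ (p : List Int), (∀ x ∈ p, 0 < x) → p ≠ [] → G p = [(true, p)] := by
  intro p hp hne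
  obtain ⟨y, p2, rfl⟩ := List.exists_cons_of_ne_nil hne
  have hdy : decide (0 < y) = true := by simp [hp y List.mem_cons_self]
  have hfun : (fun w : Int => decide (0 < w) == decide (0 < y)) = fun w => decide (0 < w) := by
    funext w
    rw [hdy]
    cases decide (0 < w) <;> rfl
  rw [G, hfun]
  have ht : p2.takeWhile (fun w : Int => decide (0 < w)) = p2 :=
    List.takeWhile_eq_self_iff.mpr (fun x hx => by simp [hp x (List.mem_cons_of_mem _ hx)])
  have hd : p2.dropWhile (fun w : Int => decide (0 < w)) = [] :=
    List.dropWhile_eq_nil_iff.mpr (fun x hx => by simp [hp x (List.mem_cons_of_mem _ hx)])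
  rw [ht, hd, G_nil, hdy]

theorem beq_false_fun : (fun y : Int => decide (0 < y) == false) = (fun y : Int => !decide (0 < y)) := by
  funext y
  cases decide (0 < y) <;> rfl

theorem B_zero (W : Int) (t : List Int) (z r p r' : List Int)
    (hz : z = ((0 : Int) :: t).takeWhile (fun y => decide (y = 0)))
    (hr : r = ((0 : Int) :: t).dropWhile (fun y => decide (y = 0)))
    (hp : p = r.takeWhile (fun y => decide (0 < y)))
    (hr' : r' = r.dropWhile (fun y => decide (0 < y)))
    (hnn : ∀ x ∈ (0 : Int) :: t, 0 ≤ x) :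
    remove_essential_regions_alt ((0 : Int) :: t) W =
      (if (z.length : Int) < W then z else []) ++
        (if r' = [] then [] else p ++ remove_essential_regions_alt r' W) := by
  have hnt : ∀ x ∈ t, 0 ≤ x := fun x hx => hnn x (List.mem_cons_of_mem _ hx)
  obtain ⟨htw, hdw⟩ := tw_neg t hnt
  have hzr : z ++ r = (0 : Int) :: t := by rw [hz, hr]; exact List.takeWhile_append_dropWhile
  have hpr' : p ++ r' = r := by rw [hp, hr']; exact List.takeWhile_append_dropWhile
  have hppos : ∀ x ∈ p, 0 < x := by
    intro x hx
    rw [hp] at hx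
    have := List.mem_takeWhile_imp (p := fun y : Int => decide (0 < y)) hx
    simpa using this
  have hnr : ∀ x ∈ r, 0 ≤ x := by
    intro x hx
    apply hnn
    rw [← hzr]
    exact List.mem_append_right z hx
  have hG : G ((0 : Int) :: t) = (false, z) :: G r := by
    rw [G]
    have hd0 : decide ((0 : Int) < 0) = false := by simp
    rw [hd0, beq_false_fun, htw, hdw]
    have hz2 : z = (0 : Int) :: t.takeWhile (fun y => decide (y = 0)) := by
      rw [hz, List.takeWhile_cons]
      simp
    have hr2 : r = t.dropWhile (fun y => decide (y = 0)) := by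
      rw [hr, List.dropWhile_cons]
      simp
    rw [← hz2, ← hr2]
  rw [B_eq, hG]
  rw [if_neg (by simp)]
  simp only [List.headD_cons, List.tail_cons]
  rw [if_neg (show ¬(((false, z) : Bool × List Int).1 = true) from by simp)]
  by_cases hre : r' = []
  · rw [if_pos hre, List.append_nil]
    rw [hre, List.append_nil] at hpr'
    by_cases hp0 : p = []
    · rw [hp0] at hpr'
      rw [← hpr', G_nil]
      rw [foldOut]
      simp
    · rw [← hpr', G_allpos p hppos hp0]
      rw [foldOut]
      simp
  · have hrne : r ≠ [] := by
      intro h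
      rw [h] at hpr'
      exact hre (List.append_eq_nil_iff.mp hpr').2
    obtain ⟨y, r2, hrc⟩ := List.exists_cons_of_ne_nil hrne
    have hyr : ¬ (decide (y = 0) = true) := by
      have hne2 : ((0 : Int) :: t).dropWhile (fun y => decide (y = 0)) ≠ [] := by rw [← hr]; exact hrne
      have hhead := List.head_dropWhile_not (fun y : Int => decide (y = 0)) hne2
      have hmem : ((0 : Int) :: t).dropWhile (fun y => decide (y = 0)) = y :: r2 := by rw [← hr, hrc]
      simp only [hmem, List.head_cons] at hhead
      simp [hhead]
    have hy : 0 < y := by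
      have h1 := hnr y (by rw [hrc]; exact List.mem_cons_self)
      simp at hyr
      omega
    have hdy : decide (0 < y) = true := by simp [hy]
    have hfun : (fun w : Int => decide (0 < w) == decide (0 < y)) = fun w => decide (0 < w) := by
      funext w
      rw [hdy]
      cases decide (0 < w) <;> rfl
    have hpc : p = y :: r2.takeWhile (fun w : Int => decide (0 < w)) := by
      rw [hp, hrc, List.takeWhile_cons, if_pos hdy]
    have hrc' : r' = r2.dropWhile (fun w : Int => decide (0 < w)) := by
      rw [hr', hrc, List.dropWhile_cons, if_pos hdy]
    have hGr : G r = (true, p) :: G r' := by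
      rw [hrc, G, hfun, ← hrc', hdy, hpc]
    -- r' starts with a zero, so G r' starts with a negative group
    obtain ⟨h', t', hcons⟩ := List.exists_cons_of_ne_nil hre
    have hh0 : h' = 0 := by
      have hne2 : r.dropWhile (fun w : Int => decide (0 < w)) ≠ [] := by rw [← hr']; exact hre
      have hhead := List.head_dropWhile_not (fun w : Int => decide (0 < w)) hne2
      have hmem : r.dropWhile (fun w : Int => decide (0 < w)) = h' :: t' := by rw [← hr', hcons]
      simp only [hmem, List.head_cons] at hhead
      have h1 : 0 ≤ h' := by
        apply hnr
        rw [← hpr', hcons]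
        exact List.mem_append_right p List.mem_cons_self
      simp at hhead
      omega
    have hGr' : G r' = (false, h' :: t'.takeWhile (fun w => decide (0 < w) == false)) ::
        G (t'.dropWhile (fun w => decide (0 < w) == false)) := by
      rw [hcons, G]
      have : decide (0 < h') = false := by rw [hh0]; simp
      rw [this]
    rw [if_neg hre]
    rw [hGr, hGr']
    conv_rhs => rw [B_eq, hGr']
    set q1 := h' :: t'.takeWhile (fun w => decide (0 < w) == false) with hq1
    set gt := G (t'.dropWhile (fun w => decide (0 < w) == false)) with hgt
    rw [if_neg (show ¬((((false, q1) :: gt).all fun g => g.1) = true) from by simp)]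
    simp only [List.headD_cons]
    rw [if_neg (show ¬(((false, q1) : Bool × List Int).1 = true) from by simp)]
    simp only [List.getLastD_cons]
    by_cases hc : (gt.getLastD (false, q1)).1 = true
    · rw [if_pos hc, if_pos hc]
      rw [List.dropLast_cons_of_ne_nil (List.cons_ne_nil _ _),
        List.dropLast_cons_of_ne_nil (List.cons_ne_nil _ _)]
      rw [foldOut, foldOut]
      simp
    · rw [if_neg hc, if_neg hc]
      rw [foldOut, foldOut]
      simp

theorem AB (W : Int) : ∀ (n : Nat) (w : List Int), w.length ≤ n → (∀ x ∈ w, 0 ≤ x) →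
    remove_essential_regions w W = remove_essential_regions_alt w W := by
  intro n
  induction n with
  | zero =>
    intro w hlen _
    have hw : w = [] := List.eq_nil_of_length_eq_zero (by omega)
    subst hw
    rfl
  | succ n ih =>
    intro w hlen hnn
    rw [A_posdrop W w, B_posdrop W w]
    have hn2 : ∀ x ∈ w.dropWhile (fun y => decide (0 < y)), 0 ≤ x :=
      fun x hx => hnn x ((List.dropWhile_sublist _).subset hx)
    have hl2 : (w.dropWhile (fun y => decide (0 < y))).length ≤ w.length :=
      (List.dropWhile_sublist _).length_le
    cases hw2e : w.dropWhile (fun y => decide (0 < y)) with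
    | nil => rfl
    | cons h0 t2 =>
      have hh0 : h0 = 0 := by
        have hne : w.dropWhile (fun y => decide (0 < y)) ≠ [] := by rw [hw2e]; simp
        have hhead := List.head_dropWhile_not (fun y : Int => decide (0 < y)) hne
        simp only [hw2e, List.head_cons] at hhead
        have h1 : 0 ≤ h0 := by
          apply hn2
          rw [hw2e]
          exact List.mem_cons_self
        simp at hhead
        omega
      subst hh0
      rw [hw2e] at hn2 hl2
      have hnt2 : ∀ x ∈ t2, 0 ≤ x := fun x hx => hn2 x (List.mem_cons_of_mem _ hx)
      rw [A_zero W t2 _ _ _ _ rfl rfl rfl rfl hn2, B_zero W t2 _ _ _ _ rfl rfl rfl rfl hn2]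
      congr 1
      by_cases hre : (((0 : Int) :: t2).dropWhile (fun y => decide (y = 0))).dropWhile (fun y => decide (0 < y)) = []
      · rw [if_pos hre, if_pos hre]
      · rw [if_neg hre, if_neg hre]
        congr 1
        apply ih
        · have e1 : ((0 : Int) :: t2).dropWhile (fun y => decide (y = 0)) = t2.dropWhile (fun y => decide (y = 0)) := by
            rw [List.dropWhile_cons]
            simp
          have l1 : (t2.dropWhile (fun y => decide (y = 0))).length ≤ t2.length :=
            (List.dropWhile_sublist _).length_le
          have l2 : ((t2.dropWhile (fun y => decide (y = 0))).dropWhile (fun y => decide (0 < y))).length ≤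
              (t2.dropWhile (fun y => decide (y = 0))).length :=
            (List.dropWhile_sublist _).length_le
          rw [e1]
          simp only [List.length_cons] at hl2
          omega
        · intro x hx
          apply hn2
          have := (List.dropWhile_sublist (fun y : Int => decide (0 < y))).subset hx
          exact (List.dropWhile_sublist (fun y : Int => decide (y = 0))).subset this

-- ===== VERDICT (by name: the statement is the Claim_ definition above) =====
theorem remove_essential_regions_spec : Claim_equal_remove_essential_regions := by
  intro wig W _ hpre
  unfold Spec_remove_essential_regions
  exact AB W wig.length wig le_rfl hpre
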